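-- pv_equiv track=rewrite | github.com/MFlowCode/MFC | toolchain/mfc/params/generators/docs_gen.py | _collapse_indices
-- ===== SOURCE A (Python) =====
-- from typing import Any, Dict, List, Tuple
--
-- def _parse_paren_content(name: str, start: int) -> Tuple[str, int]:
--     """Parse content within parentheses, return (content, end_index) or ('', -1) if invalid."""
--     j = start + 1
--     paren_content = []
--     while j < len(name) and name[j] != ')':
--         paren_content.append(name[j])
--         j += 1
--     if j < len(name):
--         return ''.join(paren_content), j
--     return '', -1
--
-- def _collapse_indices(name: str) -> str:
--     """
--     Collapse numeric indices to placeholders for pattern grouping.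
--
--     Examples:
--         patch_icpp(1)%vel(2) -> patch_icpp(N)%vel(M)
--         simplex_params%perturb_dens_offset(1, 2) -> simplex_params%perturb_dens_offset(N, M)
--         bc_x%vel_in(1) -> bc_x%vel_in(N)
--     """
--     placeholders = ['N', 'M', 'K', 'L', 'P', 'Q']
--     placeholder_idx = 0
--     result = []
--     i = 0
--
--     while i < len(name):
--         if name[i] != '(':
--             result.append(name[i])
--             i += 1
--             continue
--
--         # Found opening paren, look for indices
--         content, end_idx = _parse_paren_content(name, i)
--         if end_idx == -1:
--             result.append(name[i])
--             i += 1
--             continue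
--
--         # Check if content is numeric indices (possibly comma-separated)
--         parts = [p.strip() for p in content.split(',')]
--         if not all(p.isdigit() for p in parts):
--             result.append(name[i])
--             i += 1
--             continue
--
--         # Replace each index with a placeholder
--         new_parts = []
--         for _ in parts:
--             ph = placeholders[placeholder_idx] if placeholder_idx < len(placeholders) else '?'
--             new_parts.append(ph)
--             placeholder_idx += 1
--         result.append('(' + ', '.join(new_parts) + ')')
--         i = end_idx + 1
--
--     return ''.join(result)
-- ===== SOURCE B (Python) =====
-- def _collapse_indices(name: str) -> str:
--     """Split once on '(' and process each chunk: O(n) single pass, no per-char rescans."""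
--     placeholders = ['N', 'M', 'K', 'L', 'P', 'Q']
--     placeholder_idx = 0
--     chunks = name.split('(')
--     out = [chunks[0]]
--     for chunk in chunks[1:]:
--         j = chunk.find(')')
--         if j >= 0:
--             parts = [p.strip() for p in chunk[:j].split(',')]
--             if all(p.isdigit() for p in parts):
--                 new_parts = []
--                 for _ in parts:
--                     ph = placeholders[placeholder_idx] if placeholder_idx < len(placeholders) else '?'
--                     new_parts.append(ph)
--                     placeholder_idx += 1
--                 out.append('(' + ', '.join(new_parts) + ')' + chunk[j + 1:])
--                 continue
--         out.append('(' + chunk)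
--     return ''.join(out)
-- ===== Notes on version B (the rewrite author's own statement) =====
-- stated objective: faster
-- what changed: B splits the string once on '(' and processes each chunk in a single pass (local ')'-search and slicing), instead of A's index loop that re-parses up to the next ')' from scratch after every '(' that does not form a numeric group.
import Mathlib
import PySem

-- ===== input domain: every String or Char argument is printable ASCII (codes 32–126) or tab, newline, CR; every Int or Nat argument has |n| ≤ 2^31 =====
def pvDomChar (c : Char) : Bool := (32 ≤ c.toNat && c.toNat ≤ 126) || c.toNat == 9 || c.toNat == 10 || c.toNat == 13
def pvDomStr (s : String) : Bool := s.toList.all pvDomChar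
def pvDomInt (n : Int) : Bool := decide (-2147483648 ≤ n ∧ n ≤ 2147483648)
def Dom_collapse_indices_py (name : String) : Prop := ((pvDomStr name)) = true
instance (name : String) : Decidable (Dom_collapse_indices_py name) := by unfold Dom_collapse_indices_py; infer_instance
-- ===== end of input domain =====

-- B replaces A's char-by-char scanning loop (which rescans after every failed group) by one
-- split on '(' plus a single pass over the chunks (objective: faster).

-- ===== PORT A =====
-- placeholders[idx] if idx < 6 else '?', idx += 1 — the inner "for _ in parts" loop,
-- which is textually identical in A and in B, shared by both ports.
def pvNewParts : Nat → Nat → List (List Char)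
  | _, 0 => []
  | k, n + 1 =>
      (if k < 6 then [(['N','M','K','L','P','Q']).getD k '?'] else ['?']) :: pvNewParts (k + 1) n

-- _parse_paren_content's while loop (content kept as List Char: ''.join of the char list).
def pvParseGo (s : List Char) (j : Nat) (acc : List Char) : List Char × Int :=
  if h : j < s.length then
    if s[j] ≠ ')' then pvParseGo s (j + 1) (acc ++ [s[j]])
    else (acc, (j : Int))
  else ([], -1)
termination_by s.length - j

-- needed by pvAGo's termination: a non-(-1) end index lies in [j, len)
theorem pvParseGo_bounds (s : List Char) (j : Nat) (acc : List Char)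
    (h : (pvParseGo s j acc).2 ≠ -1) :
    (j : Int) ≤ (pvParseGo s j acc).2 ∧ (pvParseGo s j acc).2 < s.length := by
  fun_induction pvParseGo s j acc with
  | case1 j acc hj hc ih => have := ih h; omega
  | case2 j acc hj hc => simp only at h ⊢; omega
  | case3 j acc hj => simp at h

-- the main while loop of _collapse_indices; res is ''.join(result) built up as List Char
def pvAGo (s : List Char) (i : Nat) (phIdx : Nat) (res : List Char) : List Char :=
  if h : i < s.length then
    if hc : s[i] ≠ '(' then pvAGo s (i + 1) phIdx (res ++ [s[i]])
    else
      let pe := pvParseGo s (i + 1) []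
      if hend : pe.2 = -1 then pvAGo s (i + 1) phIdx (res ++ [s[i]])
      else
        let parts := (PySem.Chars.splitOn pe.1 [',']).map PySem.Chars.strip
        if parts.all PySem.Chars.strIsdigit then
          pvAGo s ((pe.2 + 1).toNat) (phIdx + parts.length)
            (res ++ (['('] ++ PySem.Chars.join [',', ' '] (pvNewParts phIdx parts.length) ++ [')']))
        else pvAGo s (i + 1) phIdx (res ++ [s[i]])
  else res
termination_by s.length - i
decreasing_by
  · omega
  · omega
  · have := pvParseGo_bounds s (i + 1) [] hend; omega
  · omega

def collapse_indices_py (name : String) : String :=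
  String.ofList (pvAGo name.toList 0 0 [])

-- ===== PORT B =====
-- one fold over chunks[1:], state = (placeholder_idx, out joined as List Char);
-- chunks[0]: str.split never returns an empty list, so headD is exact.
-- the body of "for chunk in chunks[1:]": state (placeholder_idx, out)
def pvBStep (st : Nat × List Char) (chunk : List Char) : Nat × List Char :=
  let j := PySem.Chars.find chunk [')']
  if 0 ≤ j then
    let parts := (PySem.Chars.splitOn (PySem.List.slice chunk none (some j)) [',']).map PySem.Chars.strip
    if parts.all PySem.Chars.strIsdigit then
      (st.1 + parts.length,
        st.2 ++ (['('] ++ PySem.Chars.join [',', ' '] (pvNewParts st.1 parts.length) ++ [')'])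
          ++ PySem.List.slice chunk (some (j + 1)) none)
    else (st.1, st.2 ++ '(' :: chunk)
  else (st.1, st.2 ++ '(' :: chunk)

def collapse_indices_py_alt (name : String) : String :=
  let chunks := PySem.Chars.splitOn name.toList ['(']
  let st := chunks.tail.foldl pvBStep (0, chunks.headD [])
  String.ofList st.2

-- ===== PRECONDITION & SPEC =====
def Spec_collapse_indices_py (name : String) (out : String) : Prop := out = collapse_indices_py_alt name
instance (name : String) (out : String) : Decidable (Spec_collapse_indices_py name out) := by unfold Spec_collapse_indices_py; infer_instance

-- ===== CLAIM (what is proved, stated in full; the proofs are below) =====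
def Claim_equal_collapse_indices_py : Prop := ∀ (name : String), Dom_collapse_indices_py name → Spec_collapse_indices_py name (collapse_indices_py name)

-- ===== LEMMAS AND PROOFS =====

-- shared abbreviations for "content is a comma-separated list of ints", its arity, and the group
def pvIsValid (content : List Char) : Bool :=
  ((PySem.Chars.splitOn content [',']).map PySem.Chars.strip).all PySem.Chars.strIsdigit
def pvNParts (content : List Char) : Nat :=
  ((PySem.Chars.splitOn content [',']).map PySem.Chars.strip).length
def pvGroup (k : Nat) (content : List Char) : List Char :=
  ['('] ++ PySem.Chars.join [',', ' '] (pvNewParts k (pvNParts content)) ++ [')']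

-- structural model of str.split(sep) for a one-character separator
def pvChunks (sep : Char) : List Char → List (List Char)
  | [] => [[]]
  | c :: t =>
      if c = sep then [] :: pvChunks sep t
      else
        match pvChunks sep t with
        | [] => [[c]]
        | h :: r => (c :: h) :: r

-- structural model of A's main loop on the remaining suffix
def pvMainA : List Char → Nat → List Char
  | [], _ => []
  | c :: t, k =>
      if c = '(' then
        if ')' ∈ t then
          if pvIsValid (t.takeWhile (· ≠ ')')) then
            pvGroup k (t.takeWhile (· ≠ ')')) ++
              pvMainA ((t.dropWhile (· ≠ ')')).tail) (k + pvNParts (t.takeWhile (· ≠ ')')))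
          else '(' :: pvMainA t k
        else '(' :: pvMainA t k
      else c :: pvMainA t k
termination_by l => l.length
decreasing_by
  · have h1 := List.length_dropWhile_le (· ≠ ')') t
    have h2 : ((t.dropWhile (· ≠ ')')).tail).length = (t.dropWhile (· ≠ ')')).length - 1 :=
      List.length_tail
    simp only [List.length_cons]; omega
  · simp only [List.length_cons]; omega
  · simp only [List.length_cons]; omega
  · simp only [List.length_cons]; omega

-- structural model of B's chunk loop
def pvH : List (List Char) → Nat → List Char
  | [], _ => []
  | c :: cs, k =>
      if ')' ∈ c then
        if pvIsValid (c.takeWhile (· ≠ ')')) then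
          pvGroup k (c.takeWhile (· ≠ ')')) ++ (c.dropWhile (· ≠ ')')).tail ++
            pvH cs (k + pvNParts (c.takeWhile (· ≠ ')')))
        else ('(' :: c) ++ pvH cs k
      else ('(' :: c) ++ pvH cs k

-- ---- generic list helpers ----

theorem pvTakeWhile_all_append {p : Char → Bool} (u v : List Char)
    (h : ∀ x ∈ u, p x = true) : (u ++ v).takeWhile p = u ++ v.takeWhile p := by
  induction u with
  | nil => simp
  | cons a u ih =>
      simp only [List.cons_append, List.takeWhile_cons, h a (by simp)]
      simp [ih (fun x hx => h x (by simp [hx]))]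

theorem pvDropWhile_all_append {p : Char → Bool} (u v : List Char)
    (h : ∀ x ∈ u, p x = true) : (u ++ v).dropWhile p = v.dropWhile p := by
  induction u with
  | nil => simp
  | cons a u ih =>
      simp only [List.cons_append, List.dropWhile_cons, h a (by simp)]
      simp [ih (fun x hx => h x (by simp [hx]))]

theorem pvMem_dropWhile {p : Char → Bool} {l : List Char} {x : Char}
    (hx : x ∈ l) (hp : p x = false) : x ∈ l.dropWhile p := by
  induction l with
  | nil => simp at hx
  | cons a t ih =>
      rw [List.dropWhile_cons]
      rcases List.mem_cons.1 hx with rfl | hxt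
      · rw [if_neg (by simp [hp])]; simp
      · split
        · exact ih hxt
        · simp [hxt]

theorem pvDropWhile_eq_cons {l : List Char} {c : Char} (h : c ∈ l) :
    l.dropWhile (· ≠ c) = c :: (l.dropWhile (· ≠ c)).tail := by
  induction l with
  | nil => simp at h
  | cons a t ih =>
      rw [List.dropWhile_cons]
      by_cases hac : a = c
      · simp [hac]
      · rw [if_pos (by simp [hac])]
        have h' : c ∈ t := by
          rcases List.mem_cons.1 h with h2 | h2
          · exact absurd h2.symm hac
          · exact h2
        exact ih h' 

theorem pvDecomp_close {t : List Char} (h : ')' ∈ t) :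
    t = t.takeWhile (· ≠ ')') ++ ')' :: (t.dropWhile (· ≠ ')')).tail := by
  conv_lhs => rw [← List.takeWhile_append_dropWhile (p := (· ≠ ')')) (l := t)]
  rw [← pvDropWhile_eq_cons h]

-- ---- parse loop characterisation ----

theorem pvParseGo_spec (s : List Char) (j : Nat) (acc : List Char) :
    pvParseGo s j acc =
      if ')' ∈ s.drop j then
        (acc ++ (s.drop j).takeWhile (· ≠ ')'),
         (j : Int) + ((s.drop j).takeWhile (· ≠ ')')).length)
      else ([], -1) := by
  fun_induction pvParseGo s j acc with
  | case1 j acc hj hc ih =>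
      rw [ih, List.drop_eq_getElem_cons hj]
      have hsj : ¬ (')' = s[j]) := fun h => hc h.symm
      have hmem : (')' ∈ s[j] :: s.drop (j + 1)) ↔ ')' ∈ s.drop (j + 1) := by
        rw [List.mem_cons]; exact or_iff_right hsj
      by_cases hin : ')' ∈ s.drop (j + 1)
      · rw [if_pos hin, if_pos (hmem.2 hin), List.takeWhile_cons, if_pos (decide_eq_true hc)]
        simp only [List.append_assoc, List.singleton_append, List.length_cons, Prod.mk.injEq]
        exact ⟨trivial, by push_cast; ring⟩
      · rw [if_neg hin, if_neg (fun hx => hin (hmem.1 hx))]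
  | case2 j acc hj hc =>
      have hcj : s[j] = ')' := by simpa using hc
      rw [List.drop_eq_getElem_cons hj, hcj]
      rw [if_pos (by simp), List.takeWhile_cons, if_neg (by decide)]
      simp
  | case3 j acc hj =>
      have : s.drop j = [] := List.drop_eq_nil_of_le (by omega)
      simp [this]

-- ---- pvChunks basics ----

theorem pvChunks_ne_nil (sep : Char) (l : List Char) : pvChunks sep l ≠ [] := by
  induction l with
  | nil => simp [pvChunks]
  | cons c t ih =>
      by_cases hc : c = sep
      · simp [pvChunks, hc]
      · simp only [pvChunks, if_neg hc]
        cases h : pvChunks sep t <;> simp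

theorem pvChunks_head (sep : Char) (l : List Char) :
    (pvChunks sep l).headD [] = l.takeWhile (· ≠ sep) := by
  induction l with
  | nil => simp [pvChunks]
  | cons c t ih =>
      by_cases hc : c = sep
      · simp [pvChunks, hc]
      · simp only [pvChunks, if_neg hc]
        cases h : pvChunks sep t with
        | nil => exact absurd h (pvChunks_ne_nil sep t)
        | cons hd r =>
            rw [h] at ih
            simp only [List.headD_cons] at ih ⊢
            rw [List.takeWhile_cons, if_pos (decide_eq_true hc), ih]

theorem pvChunks_append (sep : Char) (u l : List Char) (hu : ∀ x ∈ u, x ≠ sep) :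
    pvChunks sep (u ++ l) = (u ++ (pvChunks sep l).headD []) :: (pvChunks sep l).tail := by
  induction u with
  | nil =>
      cases h : pvChunks sep l with
      | nil => exact absurd h (pvChunks_ne_nil sep l)
      | cons hd r => simp [h]
  | cons a u ih =>
      have ha : a ≠ sep := hu a (by simp)
      simp only [List.cons_append, pvChunks, if_neg ha]
      rw [ih (fun x hx => hu x (by simp [hx]))]

-- ---- PySem.Chars.splitOn for a one-character separator ----

theorem pvSplitOn_go_spec (sep : Char) (fuel : Nat) :
    ∀ (l cur : List Char) (acc : List (List Char)), l.length < fuel →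
    PySem.Chars.splitOn.go [sep] fuel l cur acc =
      acc.reverse ++ (cur.reverse ++ (pvChunks sep l).headD []) :: (pvChunks sep l).tail := by
  induction fuel with
  | zero => intro l cur acc h; omega
  | succ fuel ih =>
      intro l cur acc h
      cases l with
      | nil => simp [PySem.Chars.splitOn.go, pvChunks]
      | cons c rest =>
          rw [PySem.Chars.splitOn.go.eq_def]
          simp only []
          by_cases hc : c = sep
          · have hpre : List.isPrefixOf [sep] (c :: rest) = true := by
              simp [List.isPrefixOf, hc]
            rw [if_pos hpre]
            simp only [List.length_cons, List.length_nil, List.drop_succ_cons, List.drop_zero]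
            rw [ih rest [] (cur.reverse :: acc) (by simp at h; omega)]
            cases hr : pvChunks sep rest with
            | nil => exact absurd hr (pvChunks_ne_nil sep rest)
            | cons hd r => simp [pvChunks, hc, hr]
          · have hpre : ¬ (List.isPrefixOf [sep] (c :: rest) = true) := by
              simp [List.isPrefixOf]
              intro hcc; exact absurd hcc.symm hc
            rw [if_neg hpre]
            rw [ih rest (c :: cur) acc (by simp at h; omega)]
            cases hr : pvChunks sep rest with
            | nil => exact absurd hr (pvChunks_ne_nil sep rest)
            | cons hd r => simp [pvChunks, hc, hr]

theorem pvSplitOn_eq_chunks (sep : Char) (l : List Char) :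
    PySem.Chars.splitOn l [sep] = pvChunks sep l := by
  show PySem.Chars.splitOn.go [sep] (l.length + 1) l [] [] = _
  rw [pvSplitOn_go_spec sep (l.length + 1) l [] [] (by omega)]
  cases h : pvChunks sep l with
  | nil => exact absurd h (pvChunks_ne_nil sep l)
  | cons hd r => simp

-- ---- PySem.Chars.find for a one-character needle ----

theorem pvFind_go_singleton (x : Char) :
    ∀ (l : List Char) (k : Nat),
    PySem.Chars.find.go [x] l k =
      if x ∈ l then ((k : Int) + (l.takeWhile (· ≠ x)).length) else -1 := by
  intro l
  induction l with
  | nil => intro k; simp [PySem.Chars.find.go]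
  | cons c t ih =>
      intro k
      rw [PySem.Chars.find.go.eq_def]
      simp only []
      by_cases hc : c = x
      · have hpre : List.isPrefixOf [x] (c :: t) = true := by simp [List.isPrefixOf, hc]
        rw [if_pos hpre, if_pos (by simp [hc])]
        rw [List.takeWhile_cons, if_neg (by simp [hc])]
        simp
      · have hpre : ¬ (List.isPrefixOf [x] (c :: t) = true) := by
          simp [List.isPrefixOf]
          intro hcc; exact absurd hcc.symm hc
        rw [if_neg hpre, ih (k + 1)]
        have hmem : (x ∈ c :: t) ↔ x ∈ t := by
          rw [List.mem_cons]; exact or_iff_right (fun h => hc h.symm)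
        by_cases hin : x ∈ t
        · rw [if_pos hin, if_pos (hmem.2 hin)]
          rw [List.takeWhile_cons, if_pos (by simp [hc])]
          simp only [List.length_cons]
          push_cast; ring
        · rw [if_neg hin, if_neg (fun h => hin (hmem.1 h))]

theorem pvFind_singleton (c : List Char) (x : Char) :
    PySem.Chars.find c [x] =
      if x ∈ c then ((c.takeWhile (· ≠ x)).length : Int) else -1 := by
  show PySem.Chars.find.go [x] c 0 = _
  rw [pvFind_go_singleton x c 0]
  simp

-- ---- a valid numeric content contains neither '(' nor ')' ----

theorem pvMem_chunks {sep : Char} {l : List Char} {x : Char}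
    (hx : x ∈ l) (hne : x ≠ sep) : ∃ c ∈ pvChunks sep l, x ∈ c := by
  induction l with
  | nil => simp at hx
  | cons a t ih =>
      by_cases ha : a = sep
      · subst ha
        have hxt : x ∈ t := by
          rcases List.mem_cons.1 hx with rfl | h
          · exact absurd rfl hne
          · exact h
        rcases ih hxt with ⟨c, hc, hxc⟩
        exact ⟨c, by simp [pvChunks, hc], hxc⟩
      · simp only [pvChunks, if_neg ha]
        cases hr : pvChunks sep t with
        | nil => exact absurd hr (pvChunks_ne_nil sep t)
        | cons hd r =>
            rcases List.mem_cons.1 hx with rfl | hxt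
            · exact ⟨x :: hd, by simp, by simp⟩
            · rcases ih hxt with ⟨c, hc, hxc⟩
              rw [hr] at hc
              rcases List.mem_cons.1 hc with rfl | hcr
              · exact ⟨a :: c, by simp, by simp [hxc]⟩
              · exact ⟨c, by simp [hcr], hxc⟩

theorem pvMem_strip {l : List Char} {x : Char}
    (hx : x ∈ l) (hs : PySem.Chars.isspace x = false) : x ∈ PySem.Chars.strip l := by
  unfold PySem.Chars.strip PySem.Chars.rstrip PySem.Chars.lstrip
  have h1 : x ∈ l.dropWhile PySem.Chars.isspace := pvMem_dropWhile hx hs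
  have h2 : x ∈ (l.dropWhile PySem.Chars.isspace).reverse := by simpa using h1
  simpa using pvMem_dropWhile h2 hs

theorem pvValid_no_char (content : List Char) (x : Char)
    (hd : PySem.Chars.isdigit x = false) (hs : PySem.Chars.isspace x = false)
    (hc : x ≠ ',') (h : pvIsValid content = true) : x ∉ content := by
  intro hmem
  rcases pvMem_chunks hmem hc with ⟨c, hcmem, hxc⟩
  unfold pvIsValid at h
  rw [pvSplitOn_eq_chunks] at h
  have hpart := List.all_eq_true.1 h (PySem.Chars.strip c) (List.mem_map_of_mem hcmem)
  unfold PySem.Chars.strIsdigit at hpart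
  rw [Bool.and_eq_true] at hpart
  have hall := hpart.2
  have hx : x ∈ PySem.Chars.strip c := pvMem_strip hxc hs
  have hxd := List.all_eq_true.1 hall x hx
  rw [hd] at hxd
  exact Bool.false_ne_true hxd

theorem pvChunks_destruct (sep : Char) (l : List Char) :
    pvChunks sep l = (l.takeWhile (· ≠ sep)) :: (pvChunks sep l).tail := by
  cases h : pvChunks sep l with
  | nil => exact absurd h (pvChunks_ne_nil sep l)
  | cons hd r =>
      have hh := pvChunks_head sep l
      rw [h] at hh
      simp only [List.headD_cons] at hh
      simp [hh]

theorem pvTwTw (t : List Char) (h : ')' ∈ t.takeWhile (· ≠ '(')) :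
    t.takeWhile (· ≠ ')') = (t.takeWhile (· ≠ '(')).takeWhile (· ≠ ')') := by
  induction t with
  | nil => simp
  | cons a t ih =>
      by_cases hao : a = '('
      · rw [List.takeWhile_cons, if_neg (by simp [hao])] at h
        simp at h
      · have e : (a :: t).takeWhile (· ≠ '(') = a :: t.takeWhile (· ≠ '(') := by
          rw [List.takeWhile_cons, if_pos (decide_eq_true hao)]
        rw [e] at h ⊢
        by_cases hac : a = ')'
        · rw [List.takeWhile_cons, if_neg (by simp [hac]), List.takeWhile_cons,
            if_neg (by simp [hac])]
        · rw [List.takeWhile_cons, if_pos (decide_eq_true hac), List.takeWhile_cons,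
            if_pos (decide_eq_true hac)]
          rw [List.mem_cons] at h
          rcases h with h | h
          · exact absurd h.symm hac
          · rw [ih h]

theorem pvTake_takeWhile (p : Char → Bool) (l : List Char) :
    l.take ((l.takeWhile p).length) = l.takeWhile p := by
  induction l with
  | nil => simp
  | cons a t ih =>
      rw [List.takeWhile_cons]
      by_cases hp : p a = true
      · rw [if_pos hp]
        simp [List.take_succ_cons, ih]
      · rw [if_neg hp]
        simp

theorem pvDrop_takeWhile (p : Char → Bool) (l : List Char) :
    l.drop ((l.takeWhile p).length + 1) = (l.dropWhile p).tail := by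
  induction l with
  | nil => simp
  | cons a t ih =>
      rw [List.takeWhile_cons, List.dropWhile_cons]
      by_cases hp : p a = true
      · rw [if_pos hp, if_pos hp]
        simpa using ih
      · rw [if_neg hp, if_neg hp]
        simp

theorem pvAGo_spec (s : List Char) (i : Nat) (k : Nat) (res : List Char) :
    pvAGo s i k res = res ++ pvMainA (s.drop i) k := by
  fun_induction pvAGo s i k res with
  | case1 i k res hlt hc ih =>
      rw [ih, List.drop_eq_getElem_cons hlt]
      rw [pvMainA, if_neg hc]
      simp
  | case2 i k res hlt hc pe hend ih =>
      have hcc : s[i] = '(' := not_not.1 hc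
      have hpe : pe = pvParseGo s (i + 1) [] := rfl
      rw [pvParseGo_spec] at hpe
      by_cases hin : ')' ∈ s.drop (i + 1)
      · rw [if_pos hin] at hpe
        rw [hpe] at hend
        simp only at hend
        omega
      · rw [ih, List.drop_eq_getElem_cons hlt, hcc]
        rw [pvMainA, if_pos rfl, if_neg hin]
        simp
  | case3 i k res hlt hc pe hend parts hall ih =>
      have hcc : s[i] = '(' := not_not.1 hc
      have hpe : pe = pvParseGo s (i + 1) [] := rfl
      rw [pvParseGo_spec] at hpe
      by_cases hin : ')' ∈ s.drop (i + 1)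
      · rw [if_pos hin] at hpe
        have hpe1 : pe.1 = (s.drop (i + 1)).takeWhile (· ≠ ')') := by rw [hpe]; simp
        have hpe2 : pe.2 = ((i : Int) + 1) + ((s.drop (i + 1)).takeWhile (· ≠ ')')).length := by
          rw [hpe]
          show ((i : Int) + 1) + _ = _
          push_cast; ring
        have hparts : parts =
            (PySem.Chars.splitOn ((s.drop (i + 1)).takeWhile (· ≠ ')')) [',']).map
              PySem.Chars.strip := by
          show (PySem.Chars.splitOn pe.1 [',']).map PySem.Chars.strip = _
          rw [hpe1]
        have htoNat : (pe.2 + 1).toNat =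
            (i + 1) + (((s.drop (i + 1)).takeWhile (· ≠ ')')).length + 1) := by
          rw [hpe2]; omega
        have hdrop : s.drop ((pe.2 + 1).toNat) = ((s.drop (i + 1)).dropWhile (· ≠ ')')).tail := by
          rw [htoNat, ← List.drop_drop, pvDrop_takeWhile]
        rw [ih, hdrop, List.drop_eq_getElem_cons hlt, hcc]
        rw [pvMainA, if_pos rfl, if_pos hin,
          if_pos (show pvIsValid ((s.drop (i + 1)).takeWhile (· ≠ ')')) = true by
            rw [pvIsValid, ← hparts]; exact hall)]
        rw [hparts]
        simp [pvGroup, pvNParts]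
      · rw [if_neg hin] at hpe
        rw [hpe] at hend
        simp at hend
  | case4 i k res hlt hc pe hend parts hall ih =>
      have hcc : s[i] = '(' := not_not.1 hc
      have hpe : pe = pvParseGo s (i + 1) [] := rfl
      rw [pvParseGo_spec] at hpe
      by_cases hin : ')' ∈ s.drop (i + 1)
      · rw [if_pos hin] at hpe
        have hpe1 : pe.1 = (s.drop (i + 1)).takeWhile (· ≠ ')') := by rw [hpe]; simp
        rw [ih, List.drop_eq_getElem_cons hlt, hcc]
        rw [pvMainA, if_pos rfl, if_pos hin,
          if_neg (show ¬ pvIsValid ((s.drop (i + 1)).takeWhile (· ≠ ')')) = true by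
            rw [pvIsValid]
            intro hx
            exact hall (by rw [show parts = (PySem.Chars.splitOn pe.1 [',']).map PySem.Chars.strip
              from rfl, hpe1]; exact hx))]
        simp
      · rw [if_neg hin] at hpe
        rw [hpe] at hend
        simp at hend
  | case5 i k res hlt =>
      rw [List.drop_eq_nil_of_le (by omega), pvMainA]
      simp

theorem pvMain_eq_chunks (l : List Char) (k : Nat) :
    pvMainA l k = (pvChunks '(' l).headD [] ++ pvH ((pvChunks '(' l).tail) k := by
  fun_induction pvMainA l k with
  | case1 k => simp [pvChunks, pvH]
  | case2 t k hmem hv ih =>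
      have hnp : '(' ∉ t.takeWhile (· ≠ ')') :=
        pvValid_no_char _ '(' (by decide) (by decide) (by decide) hv
      have hu : ∀ x ∈ t.takeWhile (· ≠ ')') ++ [')'], x ≠ '(' := by
        intro x hx
        rcases List.mem_append.1 hx with hx | hx
        · exact fun he => hnp (he ▸ hx)
        · rw [List.mem_singleton] at hx; subst hx; decide
      have hchT : pvChunks '(' t =
          ((t.takeWhile (· ≠ ')') ++ [')']) ++
              (pvChunks '(' ((t.dropWhile (· ≠ ')')).tail)).headD []) ::
            (pvChunks '(' ((t.dropWhile (· ≠ ')')).tail)).tail := by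
        conv_lhs => rw [pvDecomp_close hmem]
        rw [show t.takeWhile (· ≠ ')') ++ ')' :: (t.dropWhile (· ≠ ')')).tail
            = (t.takeWhile (· ≠ ')') ++ [')']) ++ (t.dropWhile (· ≠ ')')).tail by simp]
        exact pvChunks_append '(' _ _ hu
      have hall : ∀ x ∈ t.takeWhile (fun x : Char => decide (x ≠ ')')),
          (fun x : Char => decide (x ≠ ')')) x = true := by
        intro x hx
        exact List.mem_takeWhile_imp (p := fun x : Char => decide (x ≠ ')')) hx
      have htake : (((t.takeWhile (· ≠ ')') ++ [')']) ++
          (pvChunks '(' ((t.dropWhile (· ≠ ')')).tail)).headD []).takeWhile (· ≠ ')'))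
          = t.takeWhile (· ≠ ')') := by
        rw [List.append_assoc, pvTakeWhile_all_append _ _ hall]
        rw [List.singleton_append, List.takeWhile_cons, if_neg (by decide)]
        simp
      have hdropt : (((t.takeWhile (· ≠ ')') ++ [')']) ++
          (pvChunks '(' ((t.dropWhile (· ≠ ')')).tail)).headD []).dropWhile (· ≠ ')')).tail
          = (pvChunks '(' ((t.dropWhile (· ≠ ')')).tail)).headD [] := by
        rw [List.append_assoc, pvDropWhile_all_append _ _ hall]
        rw [List.singleton_append, List.dropWhile_cons, if_neg (by decide)]
        simp
      have hch : pvChunks '(' ('(' :: t) = [] :: pvChunks '(' t := by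
        simp [pvChunks]
      rw [hch]
      simp only [List.headD_cons, List.tail_cons, List.nil_append]
      rw [hchT, pvH, if_pos (by simp : ')' ∈ (t.takeWhile (· ≠ ')') ++ [')']) ++
        (pvChunks '(' ((t.dropWhile (· ≠ ')')).tail)).headD [])]
      rw [htake, if_pos hv, hdropt, ih]
      simp
  | case3 t k hmem hv ih =>
      have hch : pvChunks '(' ('(' :: t) = [] :: pvChunks '(' t := by
        simp [pvChunks]
      rw [hch]
      simp only [List.headD_cons, List.tail_cons, List.nil_append]
      rw [pvChunks_destruct '(' t, ih, pvChunks_head]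
      by_cases hinh : ')' ∈ t.takeWhile (· ≠ '(')
      · rw [pvH, if_pos hinh, if_neg (by rw [← pvTwTw t hinh]; exact hv)]
        simp
      · rw [pvH, if_neg hinh]
        simp
  | case4 t k hnmem ih =>
      have hch : pvChunks '(' ('(' :: t) = [] :: pvChunks '(' t := by
        simp [pvChunks]
      rw [hch]
      simp only [List.headD_cons, List.tail_cons, List.nil_append]
      rw [pvChunks_destruct '(' t, ih, pvChunks_head]
      have hinh : ')' ∉ t.takeWhile (· ≠ '(') :=
        fun hx => hnmem ((List.takeWhile_sublist _).subset hx)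
      rw [pvH, if_neg hinh]
      simp
  | case5 c t k hne ih =>
      rw [show (c :: t) = [c] ++ t from rfl,
        pvChunks_append '(' [c] t (by intro x hx; rw [List.mem_singleton] at hx; subst hx; exact hne)]
      simp only [List.headD_cons, List.tail_cons, List.singleton_append]
      rw [ih]
      simp

theorem pvStep_eq (k : Nat) (acc c : List Char) :
    pvBStep (k, acc) c =
      if ')' ∈ c then
        if pvIsValid (c.takeWhile (· ≠ ')')) then
          (k + pvNParts (c.takeWhile (· ≠ ')')),
           acc ++ pvGroup k (c.takeWhile (· ≠ ')')) ++ (c.dropWhile (· ≠ ')')).tail)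
        else (k, acc ++ '(' :: c)
      else (k, acc ++ '(' :: c) := by
  simp only [pvBStep, pvFind_singleton]
  by_cases hin : ')' ∈ c
  · rw [if_pos hin]
    have h0 : (0 : Int) ≤ ((c.takeWhile (· ≠ ')')).length : Int) := by positivity
    rw [if_pos h0, PySem.List.slice_to c h0, PySem.List.slice_from c (by omega)]
    have htn : (((c.takeWhile (· ≠ ')')).length : Int)).toNat = (c.takeWhile (· ≠ ')')).length := by
      omega
    have htn1 : ((((c.takeWhile (· ≠ ')')).length : Int)) + 1).toNat
        = (c.takeWhile (· ≠ ')')).length + 1 := by omega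
    rw [htn, htn1, pvTake_takeWhile, pvDrop_takeWhile]
    by_cases hv : pvIsValid (c.takeWhile (· ≠ ')')) = true
    · rw [if_pos (show ((PySem.Chars.splitOn (c.takeWhile (· ≠ ')')) [',']).map
          PySem.Chars.strip).all PySem.Chars.strIsdigit = true from hv), if_pos hv]
      simp [hin, pvGroup, pvNParts]
    · rw [if_neg (show ¬ ((PySem.Chars.splitOn (c.takeWhile (· ≠ ')')) [',']).map
          PySem.Chars.strip).all PySem.Chars.strIsdigit = true from hv), if_neg hv]
      simp [hin]
  · rw [if_neg hin, if_neg (by decide)]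
    simp [hin]

theorem pvFold_spec (cs : List (List Char)) (k : Nat) (acc : List Char) :
    (cs.foldl pvBStep (k, acc)).2 = acc ++ pvH cs k := by
  induction cs generalizing k acc with
  | nil => simp [pvH]
  | cons c cs ih =>
      rw [List.foldl_cons, pvStep_eq]
      by_cases hin : ')' ∈ c
      · rw [if_pos hin]
        by_cases hv : pvIsValid (c.takeWhile (· ≠ ')')) = true
        · rw [if_pos hv, ih]
          rw [pvH, if_pos hin, if_pos hv]
          simp
        · rw [if_neg hv, ih]
          rw [pvH, if_pos hin, if_neg hv]
          simp
      · rw [if_neg hin, ih]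
        rw [pvH, if_neg hin]
        simp

-- ===== VERDICT (by name: the statement is the Claim_ definition above) =====
theorem collapse_indices_py_spec : Claim_equal_collapse_indices_py := by
  intro name _
  show collapse_indices_py name = collapse_indices_py_alt name
  simp only [collapse_indices_py, collapse_indices_py_alt]
  rw [pvAGo_spec]
  rw [pvFold_spec]
  rw [pvSplitOn_eq_chunks]
  simp only [List.drop_zero, List.nil_append]
  rw [pvMain_eq_chunks]
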